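-- pv_equiv track=rewrite | github.com/daivan/sudoku-solver | classes/BoardGenerator.py | applyKeyToConstants
-- ===== SOURCE A (Python) =====
-- def applyKeyToConstants(key,constants):
--     board = []
--     counter = 0
--     for n in constants:
--         if(n==0):
--             board.append(int(key[counter]))
--             counter+=1
--         else:
--             board.append(n)
--     return board
-- ===== SOURCE B (Python) =====
-- def applyKeyToConstants(key, constants):
--     board = list(constants)
--     i = -1
--     for j in range(constants.count(0)):
--         i = board.index(0, i + 1)
--         board[i] = int(key[j])
--     return board
-- ===== Notes on version B (the rewrite author's own statement) =====
-- stated objective: alternative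
-- what changed: B inverts the control flow: instead of A's single scan over constants testing each element with a running key counter, B loops over the key digits (one iteration per zero) and jumps to each next zero position with list.index(0, start), overwriting it in a mutable copy.
import Mathlib
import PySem

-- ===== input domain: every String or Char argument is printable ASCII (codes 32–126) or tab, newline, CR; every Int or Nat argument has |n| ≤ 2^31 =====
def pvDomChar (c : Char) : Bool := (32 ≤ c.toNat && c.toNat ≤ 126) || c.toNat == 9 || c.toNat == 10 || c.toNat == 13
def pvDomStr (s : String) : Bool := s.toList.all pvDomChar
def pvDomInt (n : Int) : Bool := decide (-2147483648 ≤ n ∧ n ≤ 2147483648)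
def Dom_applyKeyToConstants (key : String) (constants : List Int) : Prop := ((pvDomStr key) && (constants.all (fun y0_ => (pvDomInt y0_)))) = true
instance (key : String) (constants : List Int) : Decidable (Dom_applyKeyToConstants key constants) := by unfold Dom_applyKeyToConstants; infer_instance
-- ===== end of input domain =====

-- B inverts the control flow: it loops over the key digits (one per zero) and jumps to each
-- next zero with list.index(0, start) in a mutable copy; same return value wherever A returns.

-- int(key[x]) : shared primitive of both Pythons (key[x] then int(); total form, exact under Pre_)
def pvKeyVal (key : String) (x : Int) : Int :=
  ((PySem.Str.pyGet? key x).bind (fun c => PySem.Int.ofStr? (String.ofList [c]))).getD 0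

-- ===== PORT A =====
def applyKeyToConstants (key : String) (constants : List Int) : List Int :=
  (constants.foldl
    (fun (st : List Int × Int) n =>
      if n = 0 then (st.1 ++ [pvKeyVal key st.2], st.2 + 1) else (st.1 ++ [n], st.2))
    ([], 0)).1

-- ===== PORT B =====
-- board.index(0, i+1): Python's list.index with a start bound; no PySem primitive takes a start,
-- so it is ported by hand, exactly: for 0 ≤ start ≤ len it is start + index of 0 in board[start:]
-- (inside Pre_ the search always succeeds, so the total fallback branch is never the value used).
def pvIndexFrom (board : List Int) (start : Int) : Int :=
  match PySem.List.index? (board.drop start.toNat) 0 with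
  | some k => start + k
  | none => start

def applyKeyToConstants_alt (key : String) (constants : List Int) : List Int :=
  ((PySem.List.pyRange 0 (PySem.List.count constants 0) 1).foldl
    (fun (st : List Int × Int) j =>
      let i := pvIndexFrom st.1 (st.2 + 1)
      (PySem.List.pySetD st.1 i (pvKeyVal key j), i))
    (constants, -1)).1

-- ===== PRECONDITION & SPEC =====
-- Pre_ excludes exactly the inputs on which Python A raises: more zeros in constants than key has
-- characters (IndexError) or a consumed key character that is not a digit (ValueError from int()).
def Pre_applyKeyToConstants (key : String) (constants : List Int) : Prop :=
  constants.count 0 ≤ key.toList.length ∧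
  (key.toList.take (constants.count 0)).all Char.isDigit = true
instance (key : String) (constants : List Int) : Decidable (Pre_applyKeyToConstants key constants) := by
  unfold Pre_applyKeyToConstants; infer_instance

def pvWitness_applyKeyToConstants : String × List Int := ("12", [0, 5, 0])

def Spec_applyKeyToConstants (key : String) (constants : List Int) (out : List Int) : Prop := out = applyKeyToConstants_alt key constants
instance (key : String) (constants : List Int) (out : List Int) : Decidable (Spec_applyKeyToConstants key constants out) := by unfold Spec_applyKeyToConstants; infer_instance

-- ===== CLAIM (what is proved, stated in full; the proofs are below) =====
def Claim_equal_applyKeyToConstants : Prop := ∀ (key : String) (constants : List Int), Dom_applyKeyToConstants key constants → Pre_applyKeyToConstants key constants → Spec_applyKeyToConstants key constants (applyKeyToConstants key constants)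

-- ===== LEMMAS AND PROOFS =====

-- the common value of both programs: fill zeros left to right with key digits starting at index c
def pvFill (key : String) : Int → List Int → List Int
  | _, [] => []
  | c, n :: rest => if n = 0 then pvKeyVal key c :: pvFill key (c + 1) rest else n :: pvFill key c rest

-- A's fold: accumulator = prefix built so far, counter = digits consumed
theorem pvA_fold (key : String) (cs : List Int) :
    ∀ (bd : List Int) (c : Int),
      (cs.foldl
        (fun (st : List Int × Int) n =>
          if n = 0 then (st.1 ++ [pvKeyVal key st.2], st.2 + 1) else (st.1 ++ [n], st.2))
        (bd, c)).1 = bd ++ pvFill key c cs := by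
  induction cs with
  | nil => intro bd c; simp [pvFill]
  | cons n rest ih =>
    intro bd c
    by_cases h : n = 0
    · subst h
      simp only [List.foldl_cons, ih]
      simp [pvFill]
    · simp only [List.foldl_cons, if_neg h, ih]
      simp [pvFill, h]

theorem pvFill_no_zero (key : String) (r : List Int) (h : (0 : Int) ∉ r) :
    ∀ (c : Int), pvFill key c r = r := by
  induction r with
  | nil => intro c; simp [pvFill]
  | cons n rest ih =>
    intro c
    have hn : n ≠ 0 := by rintro rfl; exact h (by simp)
    simp [pvFill, hn, ih (fun hm => h (by simp [hm]))]

theorem pvFill_split (key : String) (r1 r2 : List Int) (h : (0 : Int) ∉ r1) (c : Int) :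
    pvFill key c (r1 ++ 0 :: r2) = r1 ++ pvKeyVal key c :: pvFill key (c + 1) r2 := by
  induction r1 with
  | nil => simp [pvFill]
  | cons n rest ih =>
    have hn : n ≠ 0 := by rintro rfl; exact h (by simp)
    simp [pvFill, hn, ih (fun hm => h (by simp [hm]))]

-- B's fold: invariant — board = pre ++ rest, i = pre.length - 1, and the loop only ever
-- looks at rest; each step peels 'rest' up to and including its first zero.
theorem pvB_fold (key : String) : ∀ (z : Nat) (rest pre : List Int) (j : Int),
    rest.count 0 = z →
    ((PySem.List.pyRange j (j + z) 1).foldl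
      (fun (st : List Int × Int) j' =>
        let i := pvIndexFrom st.1 (st.2 + 1)
        (PySem.List.pySetD st.1 i (pvKeyVal key j'), i))
      (pre ++ rest, (pre.length : Int) - 1)).1 = pre ++ pvFill key j rest := by
  intro z
  induction z with
  | zero =>
    intro rest pre j hz
    have h0 : (0 : Int) ∉ rest := by
      intro hm; have := List.count_pos_iff.mpr hm; omega
    simp [PySem.List.pyRange, pvFill_no_zero key rest h0]
  | succ z ih =>
    intro rest pre j hz
    -- rest contains a zero: split at the first one
    have hmem : (0 : Int) ∈ rest := by
      by_contra hm; rw [List.count_eq_zero_of_not_mem hm] at hz; omega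
    obtain ⟨k, hk⟩ := Option.isSome_iff_exists.mp ((PySem.List.index?_isSome_iff rest 0).mpr hmem)
    obtain ⟨r1, r2, hsplit, hlen, hnot⟩ := (PySem.List.index?_eq_some_iff rest 0 k).mp hk
    -- unfold one range step
    have hrange : PySem.List.pyRange j (j + (z + 1 : Nat)) 1
        = j :: PySem.List.pyRange (j + 1) (j + 1 + z) 1 := by
      have := PySem.List.pyRange_one_cons (a := j) (b := j + (z + 1 : Nat)) (by push_cast; omega)
      rw [this]; congr 1; congr 1; push_cast; ring
    rw [hrange]
    simp only [List.foldl_cons]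
    -- the index found in this step
    have hidx : pvIndexFrom (pre ++ rest) ((pre.length : Int) - 1 + 1)
        = (pre.length : Int) + k := by
      have ht : ((pre.length : Int) - 1 + 1).toNat = pre.length := by omega
      rw [PySem.List.index?_eq_idxOf?] at hk
      simp [pvIndexFrom, ht, hk]
    rw [hidx]
    -- the set at that index
    have hset : PySem.List.pySetD (pre ++ rest) ((pre.length : Int) + k) (pvKeyVal key j)
        = (pre ++ r1 ++ [pvKeyVal key j]) ++ r2 := by
      rw [PySem.List.pySetD_of_nonneg _ _ (by positivity)]
      have ht : ((pre.length : Int) + k).toNat = pre.length + k := by omega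
      rw [ht, hsplit, ← hlen]
      rw [show pre ++ (r1 ++ 0 :: r2) = (pre ++ r1) ++ 0 :: r2 by simp,
          show pre.length + r1.length = (pre ++ r1).length by simp]
      rw [List.set_append_right _ _ (by omega)]
      simp
    rw [hset]
    -- counts: r1 has no zeros, so r2 has z zeros
    have hz2 : r2.count 0 = z := by
      rw [hsplit] at hz
      simp [List.count_append, List.count_eq_zero_of_not_mem hnot] at hz
      omega
    have hlen' : ((pre ++ r1 ++ [pvKeyVal key j]).length : Int) - 1 = (pre.length : Int) + k := by
      simp [← hlen]; omega
    rw [← hlen']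
    rw [ih r2 (pre ++ r1 ++ [pvKeyVal key j]) (j + 1) hz2]
    rw [hsplit, pvFill_split key r1 r2 hnot j]
    simp

-- ===== VERDICT (by name: the statement is the Claim_ definition above) =====
theorem applyKeyToConstants_spec : Claim_equal_applyKeyToConstants := by
  intro key constants _ _
  unfold Spec_applyKeyToConstants applyKeyToConstants applyKeyToConstants_alt
  rw [pvA_fold key constants [] 0]
  have hb := pvB_fold key (constants.count 0) constants [] 0 rfl
  simp only [List.nil_append, zero_add, List.length_nil, Nat.cast_zero, zero_sub,
    PySem.List.count_eq] at hb ⊢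
  exact hb.symm
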